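-- pv_equiv track=rewrite | github.com/anantvir/DataStructures_Trees | Recover_Binary_Search_Tree.py | find_swapped
-- ===== SOURCE A (Python) =====
-- def find_swapped(a):
--     x = y = None
--     for i in range(len(a)-1):
--         if a[i] > a[i+1]:
--             x = a[i+1]
--             y = a[i]
--         else:
--             continue
--     return [x,y]
-- ===== SOURCE B (Python) =====
-- def find_swapped(a):
--     for i in range(len(a) - 2, -1, -1):
--         if a[i] > a[i + 1]:
--             return [a[i + 1], a[i]]
--     return [None, None]
-- ===== Notes on version B (the rewrite author's own statement) =====
-- stated objective: faster
-- what changed: B scans the adjacent pairs backwards and returns immediately at the first inversion found (which is A's last forward inversion), instead of A's full forward scan that overwrites the result at every inversion; the early exit skips the rest of the scan whenever an inversion exists.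
import Mathlib
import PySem

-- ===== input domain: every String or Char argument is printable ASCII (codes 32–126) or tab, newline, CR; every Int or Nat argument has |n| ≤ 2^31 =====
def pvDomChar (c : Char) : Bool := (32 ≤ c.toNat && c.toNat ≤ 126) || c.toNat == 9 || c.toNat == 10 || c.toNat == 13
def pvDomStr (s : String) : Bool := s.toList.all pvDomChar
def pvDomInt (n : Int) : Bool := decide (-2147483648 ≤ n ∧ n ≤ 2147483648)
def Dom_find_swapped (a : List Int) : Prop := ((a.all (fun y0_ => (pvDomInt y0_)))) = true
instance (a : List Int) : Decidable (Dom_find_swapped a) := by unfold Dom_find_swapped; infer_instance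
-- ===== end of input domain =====

-- B scans the adjacent pairs backwards and returns at the first inversion found (A's last
-- forward inversion), instead of A's forward scan that overwrites its result at every inversion.

-- ===== PORT A =====
-- Loop indices i ∈ range(len(a)-1) are always in range, so a[i] / a[i+1] are read with
-- getD (exact here: Python's indexing never goes out of range on these indices).
def find_swapped (a : List Int) : List (Option Int) :=
  let p := (List.range (a.length - 1)).foldl
    (fun (s : Option Int × Option Int) (i : Nat) =>
      if a.getD i 0 > a.getD (i + 1) 0 then (some (a.getD (i + 1) 0), some (a.getD i 0))
      else s)
    (none, none)
  [p.1, p.2]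

-- ===== PORT B =====
-- bGo a k checks indices i = k-1, k-2, …, 0 (Python's range(len(a)-2, -1, -1) started
-- with k = len(a)-1) and returns at the first inversion.
def bGo (a : List Int) : Nat → List (Option Int)
  | 0 => [none, none]
  | k + 1 =>
      if a.getD k 0 > a.getD (k + 1) 0 then [some (a.getD (k + 1) 0), some (a.getD k 0)]
      else bGo a k

def find_swapped_alt (a : List Int) : List (Option Int) := bGo a (a.length - 1)

-- ===== PRECONDITION & SPEC =====
def Spec_find_swapped (a : List Int) (out : List (Option Int)) : Prop := out = find_swapped_alt a
instance (a : List Int) (out : List (Option Int)) : Decidable (Spec_find_swapped a out) := by unfold Spec_find_swapped; infer_instance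

-- ===== CLAIM (what is proved, stated in full; the proofs are below) =====
def Claim_equal_find_swapped : Prop := ∀ (a : List Int), Dom_find_swapped a → Spec_find_swapped a (find_swapped a)

-- ===== LEMMAS AND PROOFS =====

-- The forward fold over range m, started at (x, y), yields (x, y) if no inversion occurs
-- below m, and otherwise the pair of the backward scan bGo a m (the last forward inversion).
theorem fold_eq_bGo (a : List Int) (m : Nat) (x y : Option Int) :
    (let p := (List.range m).foldl
        (fun (s : Option Int × Option Int) (i : Nat) =>
          if a.getD i 0 > a.getD (i + 1) 0 then (some (a.getD (i + 1) 0), some (a.getD i 0))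
          else s) (x, y)
     [p.1, p.2]) = if bGo a m = [none, none] then [x, y] else bGo a m := by
  induction m generalizing x y with
  | zero => simp [bGo]
  | succ k ih =>
    simp only [List.range_succ, List.foldl_append, List.foldl_cons, List.foldl_nil, bGo]
    by_cases h : a.getD k 0 > a.getD (k + 1) 0
    · rw [if_pos h, if_pos h]; simp
    · rw [if_neg h, if_neg h]; exact ih x y

theorem find_swapped_spec : Claim_equal_find_swapped := by
  intro a _
  unfold Spec_find_swapped find_swapped find_swapped_alt
  rw [fold_eq_bGo]
  split
  · next h => rw [h]
  · rfl
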